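-- pv_equiv track=rewrite | github.com/B-rianMakos/PythonPractice | Assignement 3/A3_300.py | alienNumbersAgain
-- ===== SOURCE A (Python) =====
-- def alienNumbersAgain(s):
--     ans = 0
--     for c in s :
--         if c in "T":
--             ans += 1 * 1024
--         elif c in "y":
--             ans += 1 * 598
--         elif c in "!":
--             ans += 1 * 121
--         elif c in "a":
--             ans += 1 * 42
--         elif c in "N":
--             ans += 1 * 6
--         elif c in "U":
--             ans += 1 * 1
--     return ans
-- ===== SOURCE B (Python) =====
-- def alienNumbersAgain(s):
--     weights = {"T": 1024, "y": 598, "!": 121, "a": 42, "N": 6, "U": 1}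
--     counts = {}
--     for c in s:
--         counts[c] = counts.get(c, 0) + 1
--     return sum(w * counts.get(c, 0) for c, w in weights.items())
-- ===== Notes on version B (the rewrite author's own statement) =====
-- stated objective: idiomatic
-- what changed: Replaces the per-character if/elif weight chain by a histogram pass (dict of character counts) followed by a sum over a fixed weight table, count*weight per key.
import Mathlib
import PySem

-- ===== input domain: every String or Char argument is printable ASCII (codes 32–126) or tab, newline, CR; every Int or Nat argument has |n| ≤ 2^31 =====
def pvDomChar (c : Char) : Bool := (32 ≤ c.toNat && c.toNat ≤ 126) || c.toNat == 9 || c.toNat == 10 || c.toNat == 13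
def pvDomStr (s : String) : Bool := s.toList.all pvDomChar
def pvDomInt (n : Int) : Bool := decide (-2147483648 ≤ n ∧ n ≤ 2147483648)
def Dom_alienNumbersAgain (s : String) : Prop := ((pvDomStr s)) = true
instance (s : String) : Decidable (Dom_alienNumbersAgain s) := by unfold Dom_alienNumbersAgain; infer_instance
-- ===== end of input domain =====

-- B replaces A's per-character if/elif chain by a character histogram plus one pass over a fixed weight table (idiomatic; same cost).

-- ===== PORT A =====
def alienNumbersAgain (s : String) : Int :=
  s.toList.foldl (fun ans c =>
    if c = 'T' then ans + 1 * 1024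
    else if c = 'y' then ans + 1 * 598
    else if c = '!' then ans + 1 * 121
    else if c = 'a' then ans + 1 * 42
    else if c = 'N' then ans + 1 * 6
    else if c = 'U' then ans + 1 * 1
    else ans) 0

-- ===== PORT B =====
def alienNumbersAgain_alt (s : String) : Int :=
  let weights : PySem.Dict Char Int :=
    PySem.Dict.mk [('T', 1024), ('y', 598), ('!', 121), ('a', 42), ('N', 6), ('U', 1)]
  let counts : PySem.Dict Char Int :=
    s.toList.foldl (fun d c => d.insert c (d.getD c 0 + 1)) PySem.Dict.empty
  (weights.items.map (fun p => p.2 * counts.getD p.1 0)).sum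

-- ===== PRECONDITION & SPEC =====
def Spec_alienNumbersAgain (s : String) (out : Int) : Prop := out = alienNumbersAgain_alt s
instance (s : String) (out : Int) : Decidable (Spec_alienNumbersAgain s out) := by unfold Spec_alienNumbersAgain; infer_instance

-- ===== CLAIM (what is proved, stated in full; the proofs are below) =====
def Claim_equal_alienNumbersAgain : Prop := ∀ (s : String), Dom_alienNumbersAgain s → Spec_alienNumbersAgain s (alienNumbersAgain s)

-- ===== LEMMAS AND PROOFS =====

theorem alienNumbersAgain_foldl_eq (l : List Char) (ans : Int) :
    l.foldl (fun ans c =>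
      if c = 'T' then ans + 1 * 1024
      else if c = 'y' then ans + 1 * 598
      else if c = '!' then ans + 1 * 121
      else if c = 'a' then ans + 1 * 42
      else if c = 'N' then ans + 1 * 6
      else if c = 'U' then ans + 1 * 1
      else ans) ans
    = ans + 1024 * l.count 'T' + 598 * l.count 'y' + 121 * l.count '!'
        + 42 * l.count 'a' + 6 * l.count 'N' + l.count 'U' := by
  induction l generalizing ans with
  | nil => simp
  | cons c t ih =>
    simp only [List.foldl_cons]
    split_ifs <;> simp only [ih, List.count_cons] <;> simp_all <;> ring

-- ===== VERDICT (by name: the statement is the Claim_ definition above) =====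
theorem alienNumbersAgain_spec : Claim_equal_alienNumbersAgain := by
  intro s _
  unfold Spec_alienNumbersAgain alienNumbersAgain alienNumbersAgain_alt
  rw [alienNumbersAgain_foldl_eq]
  simp only [PySem.Dict.getD_foldl_insert_add_one, PySem.Dict.getD_empty,
    List.map, List.sum_cons, List.sum_nil]
  ring
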